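-- pv_equiv track=rewrite | github.com/Bonnieliuliu/LeetCodePlayGround | KickStart/BigButtons/BigButtons.py | BigButtons
-- ===== SOURCE A (Python) =====
-- def BigButtons(tinput_number, tinput_prefix):
--     output = []
--     i = 0
--     for ele in tinput_number:
--         N = ele[0]
--         P = ele[1]
--         count = 2**N
--         prefix_list = sorted(tinput_prefix[i])
--         for j in range(len(prefix_list)-1, -1, -1):
--             for k in range(j-1, -1, -1):
--                 if prefix_list[j].startswith(prefix_list[k]):
--                     del prefix_list[j]
--                     break
--                 else:
--                     continue
--         for item in prefix_list:
--             len_item = len(item)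
--             decrease = 2**(N-len_item)
--             count -= decrease
--         count = 0 if count<0 else count
--         i+=1
--         output.append(count)
--     return output
-- ===== SOURCE B (Python) =====
-- def BigButtons(tinput_number, tinput_prefix):
--     def solve(case, prefixes):
--         N = case[0]
--         stack = []
--         for p in sorted(prefixes):
--             if not (stack and p.startswith(stack[-1])):
--                 stack.append(p)
--         return max(0, 2**N - sum(2**(N - len(p)) for p in stack))
--     return [solve(case, prefixes) for case, prefixes in zip(tinput_number, tinput_prefix)]
-- ===== Notes on version B (the rewrite author's own statement) =====
-- stated objective: faster
-- what changed: Replaces A's quadratic in-place deletion (each sorted prefix compared against every earlier one, with del) by a single left-to-right pass over the sorted prefixes that keeps an antichain stack and compares each prefix only to the last retained one; per case the count is 2^N minus a sum instead of a mutating subtraction loop.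
-- outside the precondition, e.g. on BigButtons([[1, 1]], []): A raises IndexError, B returns []; on BigButtons([[1]], [['a']]): A raises IndexError, B returns [1]; on BigButtons([[-1, 0]], [[]]): A returns [0.5], B returns [0.5]
import Mathlib
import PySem

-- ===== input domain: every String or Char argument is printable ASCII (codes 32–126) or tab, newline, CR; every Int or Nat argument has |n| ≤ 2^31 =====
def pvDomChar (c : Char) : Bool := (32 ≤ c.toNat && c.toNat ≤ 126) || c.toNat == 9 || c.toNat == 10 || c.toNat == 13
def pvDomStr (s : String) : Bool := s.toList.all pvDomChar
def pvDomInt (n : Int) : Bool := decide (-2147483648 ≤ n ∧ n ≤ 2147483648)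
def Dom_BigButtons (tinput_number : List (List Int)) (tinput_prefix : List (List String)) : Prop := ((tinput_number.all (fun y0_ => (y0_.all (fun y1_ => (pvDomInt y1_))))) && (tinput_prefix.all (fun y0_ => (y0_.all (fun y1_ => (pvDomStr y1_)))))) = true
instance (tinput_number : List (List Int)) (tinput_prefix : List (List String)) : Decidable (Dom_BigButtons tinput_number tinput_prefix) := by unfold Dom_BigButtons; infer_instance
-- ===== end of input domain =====

-- B replaces A's quadratic in-place prefix deletion by a single antichain-stack pass
-- over the sorted prefixes (objective: faster).

-- ===== PORT A =====
-- inner loop body: 'for k in range(j-1,-1,-1): if prefix_list[j].startswith(prefix_list[k]): del prefix_list[j]; break'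
def bbStep (cur : List String) (j : Nat) : List String :=
  if ((List.range j).reverse).any
      (fun k => PySem.Str.startswith (cur.getD j "") (cur.getD k "")) then
    cur.eraseIdx j
  else cur

-- 'for j in range(len(prefix_list)-1, -1, -1)': bbLoop cur n runs j = n-1, n-2, …, 0
def bbLoop : List String → Nat → List String
  | cur, 0 => cur
  | cur, j + 1 => bbLoop (bbStep cur j) j

-- the body of A's outer 'for ele in tinput_number' loop, given ele and tinput_prefix[i]
def bbACase (ele : List Int) (prefixes : List String) : Int :=
  let N := PySem.List.pyGetD ele 0 0
  let _P := PySem.List.pyGetD ele 1 0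
  let prefix_list := PySem.List.sorted prefixes (fun s => s) false
  let pl := bbLoop prefix_list prefix_list.length
  let count := pl.foldl (fun c item => c - (2:Int) ^ (N - PySem.Str.len item).toNat)
                 ((2:Int) ^ N.toNat)
  if count < 0 then 0 else count

def BigButtons (tinput_number : List (List Int)) (tinput_prefix : List (List String)) : List Int :=
  (tinput_number.foldl
    (fun (st : List Int × Int) ele =>
      (st.1 ++ [bbACase ele (PySem.List.pyGetD tinput_prefix st.2 [])], st.2 + 1))
    ([], 0)).1

-- ===== PORT B =====
-- 'if not (stack and p.startswith(stack[-1])): stack.append(p)'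
def bbKeep (stack : List String) (p : String) : List String :=
  if (match stack.getLast? with
      | some q => PySem.Str.startswith p q
      | none => false) then stack
  else stack ++ [p]

def bbSolve (case_ : List Int) (prefixes : List String) : Int :=
  let N := PySem.List.pyGetD case_ 0 0
  let stack := (PySem.List.sorted prefixes (fun s => s) false).foldl bbKeep []
  max 0 ((2:Int) ^ N.toNat - (stack.map (fun p => (2:Int) ^ (N - PySem.Str.len p).toNat)).sum)

def BigButtons_alt (tinput_number : List (List Int)) (tinput_prefix : List (List String)) : List Int :=
  (tinput_number.zip tinput_prefix).map (fun pr => bbSolve pr.1 pr.2)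

-- ===== PRECONDITION & SPEC =====
-- Pre_ excludes exactly the inputs where Python A raises IndexError (a test case with
-- fewer than 2 numbers, or more test cases than prefix lists) or returns floats instead
-- of ints (N negative, or some retained prefix — one with no distinct prefix of it in
-- the same list — longer than N, making 2**(N-len) fractional).
def Pre_BigButtons (tinput_number : List (List Int)) (tinput_prefix : List (List String)) : Prop :=
  tinput_number.length ≤ tinput_prefix.length ∧
  ∀ pr ∈ tinput_number.zip tinput_prefix,
    2 ≤ pr.1.length ∧ 0 ≤ PySem.List.pyGetD pr.1 0 0 ∧
    ∀ p ∈ pr.2, PySem.Str.len p ≤ PySem.List.pyGetD pr.1 0 0 ∨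
      ∃ q ∈ pr.2, q ≠ p ∧ PySem.Str.startswith p q = true

instance (tinput_number : List (List Int)) (tinput_prefix : List (List String)) : Decidable (Pre_BigButtons tinput_number tinput_prefix) := by
  unfold Pre_BigButtons; infer_instance

def pvWitness_BigButtons : List (List Int) × List (List String) :=
  ([[2, 1], [3, 2]], [["a", "ab", "b"], ["aa", "ab"]])

def Spec_BigButtons (tinput_number : List (List Int)) (tinput_prefix : List (List String)) (out : List Int) : Prop := out = BigButtons_alt tinput_number tinput_prefix
instance (tinput_number : List (List Int)) (tinput_prefix : List (List String)) (out : List Int) : Decidable (Spec_BigButtons tinput_number tinput_prefix out) := by unfold Spec_BigButtons; infer_instance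

-- ===== CLAIM (what is proved, stated in full; the proofs are below) =====
def Claim_equal_BigButtons : Prop := ∀ (tinput_number : List (List Int)) (tinput_prefix : List (List String)), Dom_BigButtons tinput_number tinput_prefix → Pre_BigButtons tinput_number tinput_prefix → Spec_BigButtons tinput_number tinput_prefix (BigButtons tinput_number tinput_prefix)

-- ===== LEMMAS AND PROOFS =====

-- left-to-right reformulation of A's dedup: x is kept iff no element before it
-- (in the original sorted list) is a prefix of it
def bbFilt (prev : List String) : List String → List String
  | [] => []
  | x :: r =>
    if prev.any (fun q => PySem.Str.startswith x q) then bbFilt (prev ++ [x]) r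
    else x :: bbFilt (prev ++ [x]) r

-- scanning all indices below the length hits exactly the elements
theorem bbAnyCongr {l : List Nat} {f g : Nat → Bool} (h : ∀ x ∈ l, f x = g x) :
    l.any f = l.any g := by
  induction l with
  | nil => rfl
  | cons a l ih =>
    simp only [List.any_cons, h a List.mem_cons_self,
      ih (fun x hx => h x (List.mem_cons_of_mem a hx))]

theorem bbAnyIdx (l : List String) (f : String → Bool) :
    ((List.range l.length).reverse).any (fun k => f (l.getD k "")) = l.any f := by
  rw [List.any_reverse, Bool.eq_iff_iff]
  simp only [List.any_eq_true, List.mem_range]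
  constructor
  · rintro ⟨k, hk, hf⟩
    exact ⟨l[k], List.getElem_mem hk, by rwa [List.getD_eq_getElem l "" hk] at hf⟩
  · rintro ⟨x, hx, hf⟩
    obtain ⟨k, hk, rfl⟩ := List.mem_iff_getElem.mp hx
    exact ⟨k, hk, by rwa [List.getD_eq_getElem l "" hk]⟩

theorem bbStep_append (init suf : List String) (j : Nat) (hj : j < init.length) :
    bbStep (init ++ suf) j = bbStep init j ++ suf := by
  unfold bbStep
  have hg : ∀ k, k ≤ j → (init ++ suf).getD k "" = init.getD k "" := by
    intro k hk
    rw [List.getD_append _ _ _ _ (lt_of_le_of_lt hk hj)]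
  have hc : ((List.range j).reverse).any
      (fun k => PySem.Str.startswith ((init ++ suf).getD j "") ((init ++ suf).getD k "")) =
      ((List.range j).reverse).any
      (fun k => PySem.Str.startswith (init.getD j "") (init.getD k "")) := by
    apply bbAnyCongr
    intro k hk
    have hk' : k < j := by simpa using hk
    rw [hg j le_rfl, hg k hk'.le]
  rw [hc]
  split
  · exact List.eraseIdx_append_of_lt_length hj _
  · rfl

theorem bbLoop_append (j : Nat) (init suf : List String) (hj : j ≤ init.length) :
    bbLoop (init ++ suf) j = bbLoop init j ++ suf := by
  induction j generalizing init with
  | zero => rfl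
  | succ j ih =>
    have hj' : j < init.length := hj
    rw [bbLoop, bbLoop, bbStep_append init suf j hj']
    apply ih
    unfold bbStep
    split
    · rw [List.length_eraseIdx_of_lt hj']; omega
    · omega

theorem bbLoop_snoc (init : List String) (x : String) :
    bbLoop (init ++ [x]) (init ++ [x]).length =
      bbLoop init init.length ++
        (if init.any (fun q => PySem.Str.startswith x q) then [] else [x]) := by
  have hlen : (init ++ [x]).length = init.length + 1 := by simp
  rw [hlen, bbLoop]
  have hx : (init ++ [x]).getD init.length "" = x := by
    rw [List.getD_append_right _ _ _ _ le_rfl]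
    simp
  have hstep : bbStep (init ++ [x]) init.length =
      if init.any (fun q => PySem.Str.startswith x q) then init else init ++ [x] := by
    unfold bbStep
    have hc : ((List.range init.length).reverse).any
        (fun k => PySem.Str.startswith ((init ++ [x]).getD init.length "") ((init ++ [x]).getD k "")) =
        init.any (fun q => PySem.Str.startswith x q) := by
      rw [← bbAnyIdx init (fun q => PySem.Str.startswith x q)]
      apply bbAnyCongr
      intro k hk
      have hk' : k < init.length := by simpa using hk
      rw [hx, List.getD_append _ _ _ _ hk']
    rw [hc]
    split
    · rw [List.eraseIdx_append_of_length_le le_rfl]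
      simp
    · rfl
  rw [hstep]
  split
  · simp
  · rw [bbLoop_append init.length init [x] le_rfl]

theorem bbFilt_snoc (l prev : List String) (x : String) :
    bbFilt prev (l ++ [x]) =
      bbFilt prev l ++
        (if (prev ++ l).any (fun q => PySem.Str.startswith x q) then [] else [x]) := by
  induction l generalizing prev with
  | nil => simp [bbFilt]
  | cons y l ih =>
    simp only [List.cons_append, bbFilt]
    split
    · rw [ih (prev ++ [y])]
      simp
    · rw [ih (prev ++ [y])]
      simp
  

theorem bbDedup_eq_filt (s : List String) :
    bbLoop s s.length = bbFilt [] s := by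
  induction s using List.reverseRecOn with
  | nil => rfl
  | append_singleton init x ih =>
    rw [bbLoop_snoc, bbFilt_snoc, ih]
    simp

-- lexicographic sandwich: a prefix of p that sorts below r ≤ p is a prefix of r
theorem bbSandwich (q : List Char) : ∀ (r p : List Char), q ≤ r → r ≤ p → q <+: p → q <+: r := by
  induction q with
  | nil => intro r p _ _ _; exact List.nil_prefix
  | cons a q ih =>
    rintro (_ | ⟨b, r⟩) p h1 h2 hq
    · rw [← Std.not_lt] at h1; exact absurd (List.nil_lt_cons a q) h1
    · cases p with
      | nil => simp at hq
      | cons c p =>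
        obtain ⟨rfl, hq'⟩ := List.cons_prefix_cons.mp hq
        rw [← Std.not_lt, List.cons_lt_cons_iff] at h1 h2
        push Not at h1 h2
        have hba' : b = a := le_antisymm h2.1 h1.1
        subst hba'
        exact List.cons_prefix_cons.mpr ⟨rfl, ih r p (h1.2 rfl) (h2.2 rfl) hq'⟩

theorem bbStartswith_iff (s p : String) :
    PySem.Str.startswith s p = true ↔ p.toList <+: s.toList := by
  rw [PySem.Str.startswith_eq]
  exact PySem.Chars.startswith_iff _ _

theorem bbFilt_sublist (prev : List String) : List.Sublist (bbFilt [] prev) prev := by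
  induction prev using List.reverseRecOn with
  | nil => simp [bbFilt]
  | append_singleton init x ih =>
    rw [bbFilt_snoc]
    split
    · exact (List.append_nil _) ▸ ih.trans (List.sublist_append_left init [x])
    · exact List.Sublist.append ih (List.Sublist.refl [x])

theorem bbFilt_cover (prev : List String) :
    ∀ q ∈ prev, ∃ q' ∈ bbFilt [] prev, q'.toList <+: q.toList := by
  induction prev using List.reverseRecOn with
  | nil => simp
  | append_singleton init x ih =>
    intro q hq
    rw [bbFilt_snoc]
    rcases List.mem_append.mp hq with hq | hq
    · obtain ⟨q', hq', hpre⟩ := ih q hq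
      exact ⟨q', by (split <;> simp [hq']), hpre⟩
    · have hq : q = x := by simpa using hq
      subst hq
      split
      · next hany =>
        obtain ⟨p0, hp0, hsw⟩ := List.any_eq_true.mp (by simpa using hany)
        obtain ⟨q', hq', hpre⟩ := ih p0 hp0
        exact ⟨q', by simp [hq'], hpre.trans ((bbStartswith_iff q p0).mp hsw)⟩
      · exact ⟨q, by simp, List.prefix_refl _⟩

theorem bbFilt_anti (prev : List String) :
    (bbFilt [] prev).Pairwise (fun a b => ¬ a.toList <+: b.toList) := by
  induction prev using List.reverseRecOn with
  | nil => simp [bbFilt]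
  | append_singleton init x ih =>
    rw [bbFilt_snoc]
    split
    · next h => simpa using ih
    · next h =>
      rw [List.pairwise_append]
      refine ⟨ih, by simp, ?_⟩
      intro a ha b hb
      have hb : b = x := by simpa using hb
      subst hb
      have ha' : a ∈ init := (bbFilt_sublist init).subset ha
      simp only [List.nil_append, Bool.not_eq_true, List.any_eq_false] at h
      intro hpre
      have := h a ha'
      rw [PySem.Str.startswith_eq] at this
      exact absurd ((PySem.Chars.startswith_iff _ _).mpr hpre) (by simp [this])

-- on a sorted list, B's test against the last retained prefix agrees with
-- A's test against all earlier elements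
theorem bbCond (prev : List String) (x : String)
    (hs : (prev ++ [x]).Pairwise (· ≤ ·)) :
    (match (bbFilt [] prev).getLast? with
      | some q => PySem.Str.startswith x q
      | none => false) = prev.any (fun q => PySem.Str.startswith x q) := by
  have hpp : prev.Pairwise (· ≤ ·) := (List.pairwise_append.mp hs).1
  have hle : ∀ a ∈ prev, a ≤ x := fun a ha =>
    (List.pairwise_append.mp hs).2.2 a ha x (List.mem_singleton.mpr rfl)
  cases hK : (bbFilt [] prev).getLast? with
  | none =>
    have hKnil : bbFilt [] prev = [] := List.getLast?_eq_none_iff.mp hK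
    have hnil : prev = [] := by
      cases prev with
      | nil => rfl
      | cons a t =>
        obtain ⟨q', hq', -⟩ := bbFilt_cover (a :: t) a List.mem_cons_self
        rw [hKnil] at hq'
        exact absurd hq' (List.not_mem_nil)
    subst hnil
    simp
  | some qlast =>
    have hKne : bbFilt [] prev ≠ [] := by
      intro hc; rw [hc] at hK; simp at hK
    have hmem : qlast ∈ bbFilt [] prev := by
      rw [← List.dropLast_append_getLast hKne]
      simp [List.getLast?_eq_some_getLast hKne] at hK
      simp [hK]
    have hdec : bbFilt [] prev = (bbFilt [] prev).dropLast ++ [qlast] := by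
      conv_lhs => rw [← List.dropLast_append_getLast hKne]
      simp [List.getLast?_eq_some_getLast hKne] at hK
      simp [hK]
    rw [Bool.eq_iff_iff]
    constructor
    · intro hsw
      exact List.any_eq_true.mpr ⟨qlast, (bbFilt_sublist prev).subset hmem, hsw⟩
    · intro hany
      obtain ⟨q, hq, hsw⟩ := List.any_eq_true.mp hany
      obtain ⟨q', hq', hpre⟩ := bbFilt_cover prev q hq
      have hqx : q'.toList <+: x.toList := hpre.trans ((bbStartswith_iff x q).mp hsw)
      rcases (List.mem_append.mp (hdec ▸ hq')) with hin | hlast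
      · -- q' strictly before the last retained element: contradiction with the antichain
        exfalso
        have hsortK : (bbFilt [] prev).Pairwise (· ≤ ·) := hpp.sublist (bbFilt_sublist prev)
        have hql : q' ≤ qlast := by
          rw [hdec] at hsortK
          exact (List.pairwise_append.mp hsortK).2.2 q' hin qlast (List.mem_singleton.mpr rfl)
        have hlx : qlast ≤ x := hle qlast ((bbFilt_sublist prev).subset hmem)
        have hpre2 : q'.toList <+: qlast.toList :=
          bbSandwich q'.toList qlast.toList x.toList
            (String.le_iff_toList_le.mp hql) (String.le_iff_toList_le.mp hlx) hqx
        have hanti := bbFilt_anti prev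
        rw [hdec, List.pairwise_append] at hanti
        exact hanti.2.2 q' hin qlast (List.mem_singleton.mpr rfl) hpre2
      · have hlast : q' = qlast := by simpa using hlast
        subst hlast
        exact (bbStartswith_iff x q').mpr hqx

theorem bbGreedy (l prev : List String) (hs : (prev ++ l).Pairwise (· ≤ ·)) :
    l.foldl bbKeep (bbFilt [] prev) = bbFilt [] (prev ++ l) := by
  induction l generalizing prev with
  | nil => simp
  | cons y r ih =>
    have hsub : List.Sublist (prev ++ [y]) (prev ++ y :: r) :=
      List.Sublist.append (List.Sublist.refl prev) ((List.nil_sublist r).cons₂ y)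
    have hcond := bbCond prev y (hs.sublist hsub)
    have hkeep : bbKeep (bbFilt [] prev) y = bbFilt [] (prev ++ [y]) := by
      rw [bbFilt_snoc prev [] y]
      unfold bbKeep
      rw [hcond]
      split <;> simp_all
    rw [List.foldl_cons, hkeep,
      ih (prev ++ [y]) (by simpa [List.append_assoc] using hs)]
    simp

theorem bbFoldl_sub (l : List String) (f : String → Int) (c : Int) :
    l.foldl (fun c item => c - f item) c = c - (l.map f).sum := by
  induction l generalizing c with
  | nil => simp
  | cons x l ih => simp [ih]; ring

theorem bbCase_eq (ele : List Int) (prefixes : List String) :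
    bbACase ele prefixes = bbSolve ele prefixes := by
  simp only [bbACase, bbSolve]
  have hsort : (PySem.List.sorted prefixes (fun s => s) false).Pairwise (· ≤ ·) := by
    simpa using PySem.List.sorted_pairwise prefixes (fun s => s)
  have hstack : (PySem.List.sorted prefixes (fun s => s) false).foldl bbKeep [] =
      bbLoop (PySem.List.sorted prefixes (fun s => s) false)
        (PySem.List.sorted prefixes (fun s => s) false).length := by
    rw [bbDedup_eq_filt]
    have := bbGreedy (PySem.List.sorted prefixes (fun s => s) false) [] (by simpa using hsort)
    simpa [bbFilt] using this
  rw [← hstack, bbFoldl_sub]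
  rcases lt_or_ge ((2:Int) ^ (PySem.List.pyGetD ele 0 0).toNat -
      (((PySem.List.sorted prefixes (fun s => s) false).foldl bbKeep []).map
        (fun p => (2:Int) ^ ((PySem.List.pyGetD ele 0 0) - PySem.Str.len p).toNat)).sum) 0 with h | h
  · rw [if_pos h, max_eq_left h.le]
  · rw [if_neg (not_lt.mpr h), max_eq_right h]


theorem bbOuter (tp : List (List String)) (tn : List (List Int)) (out : List Int) (n : Nat)
    (h : n + tn.length ≤ tp.length) :
    (tn.foldl
      (fun (st : List Int × Int) ele =>
        (st.1 ++ [bbACase ele (PySem.List.pyGetD tp st.2 [])], st.2 + 1))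
      (out, (n : Int))).1 =
    out ++ (tn.zip (tp.drop n)).map (fun pr => bbSolve pr.1 pr.2) := by
  induction tn generalizing out n with
  | nil => simp
  | cons ele tl ih =>
    have hn : n < tp.length := by simp at h; omega
    have hget : PySem.List.pyGetD tp ((n : Nat) : Int) [] = tp[n] := by
      rw [PySem.List.pyGetD_natCast]
      exact List.getD_eq_getElem tp [] hn
    have hdrop : tp.drop n = tp[n] :: tp.drop (n + 1) := List.drop_eq_getElem_cons hn
    have hcast : ((n : Nat) : Int) + 1 = (((n + 1 : Nat)) : Int) := by push_cast; ring
    rw [List.foldl_cons]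
    simp only [hget, hcast]
    rw [ih (out ++ [bbACase ele tp[n]]) (n + 1) (by simp at h ⊢; omega)]
    rw [hdrop, List.zip_cons_cons, List.map_cons, bbCase_eq]
    simp

-- ===== VERDICT (by name: the statement is the Claim_ definition above) =====
theorem BigButtons_spec : Claim_equal_BigButtons := by
  intro tn tp _ hpre
  unfold Spec_BigButtons BigButtons BigButtons_alt
  have := bbOuter tp tn [] 0 (by simpa using hpre.1)
  simpa using this
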